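-- pv_equiv track=rewrite | github.com/donjonsec/donjon-releases | web/api_compliance_overlap.py | _count_shared_controls
-- ===== SOURCE A (Python) =====
-- def _count_shared_controls(framework_controls: dict[str, set[str]]) -> int:
--     if len(framework_controls) < 2:
--         return 0
--     sets = list(framework_controls.values())
--     common: set[str] = sets[0].copy()
--     for s in sets[1:]:
--         common &= s
--     return len(common)
-- ===== SOURCE B (Python) =====
-- def _count_shared_controls(framework_controls: dict[str, set[str]]) -> int:
--     n = len(framework_controls)
--     if n < 2:
--         return 0
--     tally: dict[str, int] = {}
--     for controls in framework_controls.values():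
--         for c in controls:
--             tally[c] = tally.get(c, 0) + 1
--     return sum(1 for v in tally.values() if v == n)
-- ===== Notes on version B (the rewrite author's own statement) =====
-- stated objective: alternative
-- what changed: Replaces the progressive set-intersection fold (copy the first set, '&=' each remaining set) with one frequency-counting pass: tally every control across all framework sets and count the controls whose tally equals the number of frameworks.
import Mathlib
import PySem

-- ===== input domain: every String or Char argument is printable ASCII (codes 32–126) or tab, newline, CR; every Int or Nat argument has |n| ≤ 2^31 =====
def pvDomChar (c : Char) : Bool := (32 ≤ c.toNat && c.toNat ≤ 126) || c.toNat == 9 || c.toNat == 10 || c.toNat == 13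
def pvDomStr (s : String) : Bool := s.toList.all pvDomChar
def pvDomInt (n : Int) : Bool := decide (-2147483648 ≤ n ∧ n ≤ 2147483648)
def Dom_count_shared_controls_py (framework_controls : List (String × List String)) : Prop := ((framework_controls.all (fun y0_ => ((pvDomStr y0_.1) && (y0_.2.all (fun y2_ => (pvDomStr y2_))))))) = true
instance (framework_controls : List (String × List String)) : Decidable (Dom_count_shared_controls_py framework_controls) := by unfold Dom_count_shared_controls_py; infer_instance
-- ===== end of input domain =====

-- B replaces A's progressive set-intersection fold with one frequency-counting pass
-- (tally each control across all framework sets; count tallies equal to the number of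
-- frameworks) — an alternative algorithm of the same cost.


-- ===== PORT A =====
-- Boundary decode shared by both ports: the Python argument is a dict[str, set[str]] —
-- the association list is read with dict semantics (duplicate keys overwrite in place)
-- and each value list with set semantics (PySem.Set.ofList).
def count_shared_controls_py (framework_controls : List (String × List String)) : Int :=
  let d := framework_controls.foldl (fun d p => d.insert p.1 p.2)
    (PySem.Dict.empty : PySem.Dict String (List String))
  if d.size < 2 then 0
  else
    match d.values.map PySem.Set.ofList with
    | [] => 0  -- unreachable: the guard ensures at least two sets
    | s0 :: rest => PySem.Set.len (rest.foldl PySem.Set.inter s0)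

-- ===== PORT B =====
def count_shared_controls_py_alt (framework_controls : List (String × List String)) : Int :=
  let d := framework_controls.foldl (fun t p => t.insert p.1 p.2)
    (PySem.Dict.empty : PySem.Dict String (List String))
  let n : Int := d.size
  if n < 2 then 0
  else
    let tally := d.values.foldl
      (fun t controls => (PySem.Set.ofList controls).foldl (fun t c => t.modify c 0 (· + 1)) t)
      (PySem.Dict.empty : PySem.Dict String Int)
    tally.values.foldl (fun acc v => if v = n then acc + 1 else acc) 0

-- ===== PRECONDITION & SPEC =====
def Spec_count_shared_controls_py (framework_controls : List (String × List String)) (out : Int) : Prop := out = count_shared_controls_py_alt framework_controls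
instance (framework_controls : List (String × List String)) (out : Int) : Decidable (Spec_count_shared_controls_py framework_controls out) := by unfold Spec_count_shared_controls_py; infer_instance

-- ===== CLAIM (what is proved, stated in full; the proofs are below) =====
def Claim_equal_count_shared_controls_py : Prop := ∀ (framework_controls : List (String × List String)), Dom_count_shared_controls_py framework_controls → Spec_count_shared_controls_py framework_controls (count_shared_controls_py framework_controls)

-- ===== LEMMAS AND PROOFS =====

-- A's intersection fold is a filter of the first set by membership in all the others.
theorem foldl_inter_eq_filter (rest : List (PySem.Set String)) (s0 : PySem.Set String) :
    rest.foldl PySem.Set.inter s0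
      = s0.filter (fun c => rest.all (fun s => s.contains c)) := by
  induction rest generalizing s0 with
  | nil => simp
  | cons hd tl ih =>
      simp only [List.foldl_cons, ih, PySem.Set.inter, List.filter_filter, List.all_cons]
      exact List.filter_congr (fun x _ => by rw [Bool.and_comm])

-- counting a control in a deduplicated list is a 0/1 membership test
theorem count_ofList (v : List String) (c : String) :
    (PySem.Set.ofList v).count c = if c ∈ v then 1 else 0 := by
  by_cases h : c ∈ v
  · rw [List.count_eq_one_of_mem (PySem.Set.nodup_ofList v)
      ((PySem.Set.mem_ofList v c).mpr h)]
    simp [h]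
  · simp [h, List.count_eq_zero_of_not_mem
      (fun hc => h ((PySem.Set.mem_ofList v c).mp hc))]

-- a control's tally over the flattened sets = the number of framework sets containing it
theorem count_flat (L : List (List String)) (c : String) :
    (L.flatMap (fun v => PySem.Set.ofList v)).count c
      = L.countP (fun v => decide (c ∈ v)) := by
  induction L with
  | nil => simp
  | cons v tl ih =>
      simp only [List.flatMap_cons, List.count_append, ih, List.countP_cons, count_ofList]
      by_cases h : c ∈ v
      · simp [h]; omega
      · simp [h]

theorem count_shared_controls_py_eq (framework_controls : List (String × List String)) :
    count_shared_controls_py framework_controls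
      = count_shared_controls_py_alt framework_controls := by
  unfold count_shared_controls_py count_shared_controls_py_alt
  set d := framework_controls.foldl (fun t p => t.insert p.1 p.2)
    (PySem.Dict.empty : PySem.Dict String (List String)) with hd
  simp only []
  have hsize : d.size = d.values.length := by
    simp [PySem.Dict.size, PySem.Dict.values]
  by_cases hlt : d.size < 2
  · have : (d.size : Int) < 2 := by exact_mod_cast hlt
    simp [hlt, this]
  · have hge : 2 ≤ d.size := Nat.le_of_not_lt hlt
    have hInt : ¬ ((d.size : Int) < 2) := by exact_mod_cast hlt
    -- values is nonempty
    obtain ⟨v0, rest, hL⟩ : ∃ v0 rest, d.values = v0 :: rest := by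
      rcases hv : d.values with _ | ⟨v0, rest⟩
      · rw [hsize, hv] at hge; simp at hge
      · exact ⟨v0, rest, rfl⟩
    simp only [if_neg hlt, if_neg hInt, hL, List.map_cons]
    -- notation
    set n : Int := (d.size : Int) with hn
    set P : String → Bool := fun c => (v0 :: rest).all (fun v => decide (c ∈ v)) with hP
    -- ===== A's side =====
    have hA : PySem.Set.len (List.foldl PySem.Set.inter (PySem.Set.ofList v0)
          (rest.map PySem.Set.ofList))
        = (((PySem.Set.ofList v0).filter P).length : Int) := by
      have hfc : (PySem.Set.ofList v0).filter
            (fun c => (rest.map PySem.Set.ofList).all (fun s => s.contains c))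
          = (PySem.Set.ofList v0).filter P := by
        apply List.filter_congr
        intro c hc
        have hcv0 : c ∈ v0 := (PySem.Set.mem_ofList v0 c).mp hc
        simp only [hP, List.all_cons, List.all_map]
        simp [PySem.Set.contains, hcv0]
        simp [Function.comp_def, PySem.Set.mem_ofList]
      rw [foldl_inter_eq_filter, hfc]
      rfl
    -- ===== B's side =====
    set flat := (v0 :: rest).flatMap (fun v => PySem.Set.ofList v) with hflat
    set tally := (v0 :: rest).foldl
      (fun t controls => (PySem.Set.ofList controls).foldl (fun t c => t.modify c 0 (· + 1)) t)
      (PySem.Dict.empty : PySem.Dict String Int) with htally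
    have htf : tally = flat.foldl (fun t c => t.modify c 0 (· + 1))
        (PySem.Dict.empty : PySem.Dict String Int) := by
      rw [htally, hflat, List.foldl_flatMap]
    have hkeys : tally.keys = PySem.Set.ofList flat := by
      rw [htf, PySem.Dict.keys_foldl_modify]
      rfl
    have hnd : tally.keys.Nodup := by rw [hkeys]; exact PySem.Set.nodup_ofList flat
    have hgetD : ∀ c, tally.getD c 0 = (flat.count c : Int) := by
      intro c
      rw [htf, PySem.Dict.getD_foldl_modify_add_one, PySem.Dict.getD_empty]
      ring
    have hvals : tally.values = (PySem.Set.ofList flat).map (fun k => ((flat.count k : Int))) := by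
      rw [PySem.Dict.values_eq_map_keys tally hnd 0, hkeys]
      exact List.map_congr_left (fun k _ => hgetD k)
    have hB : tally.values.foldl (fun acc v => if v = n then acc + 1 else acc) 0
        = ((((PySem.Set.ofList flat).filter P).length : Nat) : Int) := by
      have hstep : tally.values.foldl
            (fun acc v => if decide (v = n) = true then acc + 1 else acc) 0
          = 0 + ((tally.values.countP (fun v => decide (v = n)) : Nat) : Int) :=
        PySem.List.foldl_count_if _ _ _
      simp only [decide_eq_true_eq, zero_add] at hstep
      rw [hstep, hvals, List.countP_map]
      have hcnt : ∀ k, (((flat.count k : Nat) : Int) = n) ↔ P k = true := by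
        intro k
        have hcf : flat.count k = (v0 :: rest).countP (fun v => decide (k ∈ v)) :=
          count_flat _ k
        have hlen : n = (((v0 :: rest).length : Nat) : Int) := by rw [hn, hsize, hL]
        rw [hcf, hlen, hP]
        rw [show ((v0 :: rest).all fun v => decide (k ∈ v)) = true
              ↔ ∀ v ∈ (v0 :: rest), decide (k ∈ v) = true from List.all_eq_true]
        constructor
        · intro h
          exact List.countP_eq_length.mp (by exact_mod_cast h)
        · intro h
          exact_mod_cast List.countP_eq_length.mpr h
      have : List.countP ((fun v => decide (v = n)) ∘ fun k => ((flat.count k : Int)))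
            (PySem.Set.ofList flat)
          = List.countP P (PySem.Set.ofList flat) :=
        List.countP_congr (fun k _ => by simpa [Function.comp_def] using hcnt k)
      rw [this]
      simp [List.countP_eq_length_filter]
    -- ===== the two filtered lists are permutations =====
    have hperm : ((PySem.Set.ofList flat).filter P).Perm ((PySem.Set.ofList v0).filter P) := by
      rw [List.perm_ext_iff_of_nodup
        (List.Nodup.filter _ (PySem.Set.nodup_ofList flat))
        (List.Nodup.filter _ (PySem.Set.nodup_ofList v0))]
      intro c
      simp only [List.mem_filter, PySem.Set.mem_ofList]
      constructor
      · rintro ⟨-, hp⟩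
        have hv0 : c ∈ v0 := by
          have := List.all_eq_true.mp hp v0 (by simp)
          simpa using this
        exact ⟨hv0, hp⟩
      · rintro ⟨hv0, hp⟩
        exact ⟨by rw [hflat]; simp [PySem.Set.mem_ofList]; exact Or.inl hv0, hp⟩
    rw [hA, hB, hperm.length_eq]

-- ===== VERDICT (by name: the statement is the Claim_ definition above) =====
theorem count_shared_controls_py_spec : Claim_equal_count_shared_controls_py := by
  intro framework_controls _
  exact count_shared_controls_py_eq framework_controls
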